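-- pv_equiv track=rewrite | github.com/PiggybankStudios/SublimeData | Packages/User/MyFunctions.py | GetLineIndentation
-- ===== SOURCE A (Python) =====
-- def GetLineIndentation(lineStr):
-- 	result = ""
--
-- 	for cIndex in range(len(lineStr)):
-- 		if (lineStr[cIndex] =='\t' or lineStr[cIndex] == ' '):
-- 			result += lineStr[cIndex]
-- 		else:
-- 			break
--
-- 	return result
-- ===== SOURCE B (Python) =====
-- def GetLineIndentation(lineStr):
-- 	stripped = lineStr.lstrip(' \t')
-- 	return lineStr[:len(lineStr) - len(stripped)]
-- ===== Notes on version B (the rewrite author's own statement) =====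
-- stated objective: idiomatic
-- what changed: Replaces the explicit index loop that appends tab/space characters and breaks at the first other character with a single library lstrip of tabs and spaces plus a slice of the computed prefix length.
import Mathlib
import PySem

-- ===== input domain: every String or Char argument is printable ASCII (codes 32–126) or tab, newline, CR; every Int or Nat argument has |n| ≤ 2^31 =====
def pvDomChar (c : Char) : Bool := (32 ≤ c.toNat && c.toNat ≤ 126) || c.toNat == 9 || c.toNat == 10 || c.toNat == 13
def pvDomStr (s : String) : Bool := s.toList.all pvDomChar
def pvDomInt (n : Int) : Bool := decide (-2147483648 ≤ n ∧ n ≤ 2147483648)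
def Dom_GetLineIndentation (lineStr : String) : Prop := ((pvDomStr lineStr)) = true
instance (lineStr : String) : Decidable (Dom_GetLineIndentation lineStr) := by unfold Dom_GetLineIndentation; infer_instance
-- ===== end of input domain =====

-- ===== PORT A =====
-- A: loop over indices, append tab/space chars to result, break at first other char.
def pvALoop : List Char → List Char → List Char
  | [], acc => acc
  | c :: rest, acc => if c = '\t' ∨ c = ' ' then pvALoop rest (acc ++ [c]) else acc

def GetLineIndentation (lineStr : String) : String :=
  String.mk (pvALoop lineStr.toList [])

-- ===== PORT B =====
-- B: lstrip(' \t') then slice the prefix of length len - len(stripped).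
def GetLineIndentation_alt (lineStr : String) : String :=
  let stripped := lineStr.toList.dropWhile (fun c => c = ' ' ∨ c = '\t')
  String.mk (lineStr.toList.take (lineStr.toList.length - stripped.length))

-- ===== PRECONDITION & SPEC =====
def Spec_GetLineIndentation (lineStr : String) (out : String) : Prop := out = GetLineIndentation_alt lineStr
instance (lineStr : String) (out : String) : Decidable (Spec_GetLineIndentation lineStr out) := by unfold Spec_GetLineIndentation; infer_instance

-- ===== CLAIM (what is proved, stated in full; the proofs are below) =====
def Claim_equal_GetLineIndentation : Prop := ∀ (lineStr : String), Dom_GetLineIndentation lineStr → Spec_GetLineIndentation lineStr (GetLineIndentation lineStr)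

-- ===== LEMMAS AND PROOFS =====

-- ===== VERDICT (by name: the statement is the Claim_ definition above) =====
theorem pvALoop_eq (l acc : List Char) :
    pvALoop l acc = acc ++ l.take (l.length - (l.dropWhile (fun c => c = ' ' ∨ c = '\t')).length) := by
  induction l generalizing acc with
  | nil => simp [pvALoop]
  | cons c rest ih =>
    by_cases h : c = '\t' ∨ c = ' '
    · have h' : (c = ' ' ∨ c = '\t') := h.symm
      simp [pvALoop, h, List.dropWhile, h', ih, List.append_assoc]
      have hle : (List.dropWhile (fun c => decide (c = ' ') || decide (c = '\t')) rest).length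
          ≤ rest.length := List.length_dropWhile_le _ _
      rw [show rest.length + 1 = Nat.succ rest.length from rfl, Nat.succ_sub hle,
        List.take_succ_cons]
    · have h' : ¬ (c = ' ' ∨ c = '\t') := fun hc => h hc.symm
      simp [pvALoop, h, List.dropWhile, h']

theorem GetLineIndentation_spec : Claim_equal_GetLineIndentation := by
  intro lineStr _
  unfold Spec_GetLineIndentation GetLineIndentation GetLineIndentation_alt
  simp [pvALoop_eq]
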